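-- pv_equiv track=rewrite | github.com/MahyarFardin/CLRS-Algoriothms | 57- Approximation Algorithms/Approx_TSP_Tour/main.py | Approx_TSP_Tour
-- ===== SOURCE A (Python) =====
-- def MST_Prim(G, c, r):
--     n = len(G)
--     key = [float('inf')] * n
--     parent = [None] * n
--     visited = [False] * n
--
--     key[r] = 0
--
--     while True:
--         u = -1
--         min_key = float('inf')
--         for v in range(n):
--             if not visited[v] and key[v] < min_key:
--                 u = v
--                 min_key = key[v]
--
--         if u == -1:
--             break
--
--         visited[u] = True
--
--         for v in range(n):
--             if not visited[v] and c[u][v] < key[v]: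
--                 key[v] = c[u][v]
--                 parent[v] = u
--
--     return parent
--
-- def Approx_TSP_Tour(G, c):
--     n = len(G)
--     r = 0
--
--     T = MST_Prim(G, c, r)
--
--     H = []
--     stack = [r]
--     while stack:
--         u = stack.pop()
--         H.append(u)
--         for v in range(n):
--             if T[v] == u:
--                 stack.append(v)
--
--     H.append(r)
--
--     return H
-- ===== SOURCE B (Python) =====
-- # B: Prim over a shrinking frontier list (no key/visited arrays, parents kept in a
-- # dict), then a children table + recursive preorder DFS instead of the explicit stack.
-- def Approx_TSP_Tour(G, c):
--     n = len(G)
--     parent = {}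
--     pending = [(v, None) for v in range(1, n)]  # (vertex, key); None = +inf
--     u = 0
--     while True:
--         # relax every frontier vertex from the vertex u we just added
--         nxt = []
--         for v, k in pending:
--             w = c[u][v]
--             if k is None or w < k:
--                 parent[v] = u
--                 nxt.append((v, w))
--             else:
--                 nxt.append((v, k))
--         # first frontier vertex with minimal finite key (frontier is in increasing
--         # vertex order, so this is the smallest such vertex)
--         best = None  # (key, vertex)
--         for v, k in nxt:
--             if k is not None and (best is None or k < best[0]):
--                 best = (k, v)
--         if best is None:
--             break
--         u = best[1]
--         pending = [(v, k) for v, k in nxt if v != u]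
--
--     children = [[] for _ in range(n)]
--     for v in range(1, n):
--         p = parent.get(v)
--         if p is not None:
--             children[p].append(v)
--
--     H = []
--
--     def visit(x):
--         H.append(x)
--         for v in reversed(children[x]):
--             visit(v)
--
--     visit(0)
--     H.append(0)
--     return H
-- ===== Notes on version B (the rewrite author's own statement) =====
-- stated objective: alternative
-- what changed: Prim's key/parent/visited arrays with full range(n) scans are replaced by a shrinking frontier list of (vertex,key) pairs with parents in a dict, and the explicit-stack tour walk with an O(n) parent scan per pop is replaced by a children table built in one pass plus a recursive preorder DFS over descending siblings.
-- outside the precondition, e.g. on Approx_TSP_Tour([[0, 0], [0, 0]], [[0, 1]]): A returns [0, 1, 0], B returns [0, 1, 0]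
import Mathlib
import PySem

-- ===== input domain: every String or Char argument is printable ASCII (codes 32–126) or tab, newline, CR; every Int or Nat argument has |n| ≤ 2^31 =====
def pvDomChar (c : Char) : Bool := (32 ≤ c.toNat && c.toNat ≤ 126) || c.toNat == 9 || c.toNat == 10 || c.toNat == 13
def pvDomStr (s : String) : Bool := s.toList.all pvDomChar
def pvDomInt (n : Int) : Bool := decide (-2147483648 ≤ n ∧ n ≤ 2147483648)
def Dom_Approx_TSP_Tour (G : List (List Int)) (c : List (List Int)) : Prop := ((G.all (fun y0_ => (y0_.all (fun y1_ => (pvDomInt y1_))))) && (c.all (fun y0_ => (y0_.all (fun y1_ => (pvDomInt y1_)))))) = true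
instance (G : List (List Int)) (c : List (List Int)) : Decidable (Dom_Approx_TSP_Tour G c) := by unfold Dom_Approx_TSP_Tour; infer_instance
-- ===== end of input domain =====

-- B replaces Prim's key/parent/visited arrays (full range(n) scans) by a shrinking
-- frontier list with parents in a dict, and the explicit-stack tour walk by a
-- children table plus a recursive preorder DFS over descending siblings.

-- ===== PORT A =====
-- float('inf') is modelled as `none`; all finite keys are ints, so `ltO` is Python's `<` exactly.
def ltO : Option Int → Option Int → Bool
  | some a, some b => decide (a < b)
  | some _, none   => true
  | none,   _      => false

-- c[u][v], none = IndexError (excluded by Pre_)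
def costOf (c : List (List Int)) (u v : Int) : Option Int :=
  (PySem.List.pyGet? c u).bind (fun row => PySem.List.pyGet? row v)

-- `c[u][v] < key[v]` (left side always a finite int when defined)
def ltCO : Option Int → Option Int → Bool
  | some a, b => ltO (some a) b
  | none,   _ => false

-- the `u = -1; for v in range(n): …` argmin scan
def mstArgmin (key : List (Option Int)) (visited : List Bool) (n : Nat) : Int × Option Int :=
  (PySem.List.pyRange 0 n 1).foldl
    (fun p v =>
      if !(visited.getD v.toNat true) && ltO (key.getD v.toNat none) p.2
      then (v, key.getD v.toNat none) else p)
    (-1, none)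

-- one `if not visited[v] and c[u][v] < key[v]` update step
def mstUpdate (c : List (List Int)) (u : Int) (visited : List Bool)
    (st : List (Option Int) × List (Option Int)) (v : Int) :
    List (Option Int) × List (Option Int) :=
  if !(visited.getD v.toNat true) && ltCO (costOf c u v) (st.1.getD v.toNat none)
  then (st.1.set v.toNat (costOf c u v), st.2.set v.toNat (some u))
  else st

-- the `while True:` loop; fuel n+1 is a pure totalization guard (each pass visits a fresh vertex)
def mstLoop (c : List (List Int)) (n : Nat) :
    Nat → List (Option Int) → List (Option Int) → List Bool → List (Option Int)
  | 0, _, parent, _ => parent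
  | f + 1, key, parent, visited =>
      let um := mstArgmin key visited n
      if um.1 = -1 then parent
      else
        let visited' := visited.set um.1.toNat true
        let kp := (PySem.List.pyRange 0 n 1).foldl (mstUpdate c um.1 visited') (key, parent)
        mstLoop c n f kp.1 kp.2 visited'

def MST_Prim (G : List (List Int)) (c : List (List Int)) (r : Int) : List (Option Int) :=
  let n := G.length
  let key := (List.replicate n (none : Option Int)).set r.toNat (some 0)
  let parent := List.replicate n (none : Option Int)
  let visited := List.replicate n false
  mstLoop c n (n + 1) key parent visited

-- `for v in range(n): if T[v] == u: stack.append(v)`  (None == u is False in Python)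
def chFold (T : List (Option Int)) (n : Nat) (u : Int) (stack : List Int) : List Int :=
  (PySem.List.pyRange 0 n 1).foldl
    (fun st v => if PySem.List.pyGet? T v == some (some u) then st ++ [v] else st) stack

-- the `while stack:` walk, emitting H as it goes; fuel is a totalization guard
-- ((n+1)^(n+1) bounds the number of pops, see the proofs below)
def walkA (T : List (Option Int)) (n : Nat) : Nat → List Int → List Int
  | 0, _ => []
  | _ + 1, [] => []
  | f + 1, s :: rest =>
      let u := (s :: rest).getLast (by simp)
      u :: walkA T n f (chFold T n u ((s :: rest).dropLast))

def Approx_TSP_Tour (G : List (List Int)) (c : List (List Int)) : List Int :=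
  let n := G.length
  let T := MST_Prim G c 0
  walkA T n ((n + 1) ^ (n + 1)) [0] ++ [0]

-- ===== PORT B =====
-- `w = c[u][v]`; exact whenever both indices are nonnegative and in range (inside Pre_)
def bCost (c : List (List Int)) (u v : Int) : Int := (c.getD u.toNat []).getD v.toNat 0

-- one `for v, k in pending:` relaxation step, building nxt and updating the parent dict
def bRelaxStep (c : List (List Int)) (u : Int)
    (st : List (Int × Option Int) × PySem.Dict Int Int) (vk : Int × Option Int) :
    List (Int × Option Int) × PySem.Dict Int Int :=
  let w := bCost c u vk.1
  if (match vk.2 with | none => true | some k => decide (w < k))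
  then (st.1 ++ [(vk.1, some w)], st.2.insert vk.1 u)
  else (st.1 ++ [vk], st.2)

-- `best = None; for v, k in nxt: …`, best stored as (key, vertex)
def bPick (l : List (Int × Option Int)) : Option (Int × Int) :=
  l.foldl
    (fun best vk =>
      match vk.2 with
      | none => best
      | some k =>
        match best with
        | none => some (k, vk.1)
        | some b => if k < b.1 then some (k, vk.1) else some b)
    none

-- the `while True:` frontier loop; fuel n+1 is a pure totalization guard
def bLoop (c : List (List Int)) :
    Nat → Int → List (Int × Option Int) → PySem.Dict Int Int → PySem.Dict Int Int
  | 0, _, _, parent => parent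
  | f + 1, u, pending, parent =>
      let np := pending.foldl (bRelaxStep c u) ([], parent)
      match bPick np.1 with
      | none => np.2
      | some b => bLoop c f b.2 (np.1.filter (fun vk => vk.1 != b.2)) np.2

-- `children[p].append(v)`; index p is nonnegative and < n inside Pre_, where this is exact
def bChild (parent : PySem.Dict Int Int) (n : Nat) : List (List Int) :=
  (PySem.List.pyRange 1 n 1).foldl
    (fun ch v =>
      match parent.get? v with
      | some p => ch.set p.toNat ((ch.getD p.toNat []) ++ [v])
      | none => ch)
    (List.replicate n [])

-- `def visit(x): H.append(x); for v in reversed(children[x]): visit(v)`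
-- fuel n+1 is a totalization guard (recursion depth is bounded by the tree height)
def bDfs (ch : List (List Int)) : Nat → Int → List Int
  | 0, _ => []
  | f + 1, u => u :: ((ch.getD u.toNat []).reverse).flatMap (bDfs ch f)

def Approx_TSP_Tour_alt (G : List (List Int)) (c : List (List Int)) : List Int :=
  let n := G.length
  let par := bLoop c (n + 1) 0
    ((PySem.List.pyRange 1 n 1).map (fun v => (v, (none : Option Int)))) PySem.Dict.empty
  bDfs (bChild par n) (n + 1) 0 ++ [0]

-- ===== PRECONDITION & SPEC =====
-- Pre_ requires a non-empty G (on G = [] A's `key[0] = 0` raises IndexError) and, for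
-- n ≥ 2, a full n×n cost matrix (c is never read when n = 1). A also happens to return on
-- some ragged c (n ≥ 2) whose missing entries belong to the last-visited vertex and are
-- never read (visit-order dependent, not closed-form); B returns the identical value
-- there (it runs the same relaxations) — see the cite.
def Pre_Approx_TSP_Tour (G : List (List Int)) (c : List (List Int)) : Prop :=
  1 ≤ G.length ∧
    (G.length = 1 ∨
      (G.length ≤ c.length ∧ ∀ row ∈ c.take G.length, G.length ≤ row.length))
instance (G : List (List Int)) (c : List (List Int)) : Decidable (Pre_Approx_TSP_Tour G c) := by
  unfold Pre_Approx_TSP_Tour; infer_instance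

def pvWitness_Approx_TSP_Tour : List (List Int) × List (List Int) :=
  ([[0, 0], [0, 0]], [[0, 3], [3, 0]])

def Spec_Approx_TSP_Tour (G : List (List Int)) (c : List (List Int)) (out : List Int) : Prop := out = Approx_TSP_Tour_alt G c
instance (G : List (List Int)) (c : List (List Int)) (out : List Int) : Decidable (Spec_Approx_TSP_Tour G c out) := by unfold Spec_Approx_TSP_Tour; infer_instance

-- ===== CLAIM (what is proved, stated in full; the proofs are below) =====
def Claim_equal_Approx_TSP_Tour : Prop := ∀ (G : List (List Int)) (c : List (List Int)), Dom_Approx_TSP_Tour G c → Pre_Approx_TSP_Tour G c → Spec_Approx_TSP_Tour G c (Approx_TSP_Tour G c)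

-- ===== LEMMAS AND PROOFS =====

-- children of u in the parent list T, in increasing index order
def CH (T : List (Option Int)) (n : Nat) (u : Int) : List Int :=
  (PySem.List.pyRange 0 n 1).filter (fun v => PySem.List.pyGet? T v == some (some u))

-- invariant of the MST loop: parents always point to visited vertices, ranked below
-- the current visit count; unvisited vertices have rank n
def MInv (n : Nat) (parent : List (Option Int)) (visited : List Bool) : Prop :=
  parent.length = n ∧ visited.length = n ∧
  ∃ μ : Int → Nat,
    (∀ x, μ x ≤ n) ∧
    (∀ i : Nat, visited[i]? = some true → μ i < visited.count true) ∧
    (∀ i : Nat, visited[i]? = some false → μ i = n) ∧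
    (∀ (i : Nat) (w : Int), parent[i]? = some (some w) →
        0 ≤ w ∧ visited[w.toNat]? = some true ∧ μ w < μ i)

-- all the tour stage needs from T: parents are in-range vertices and edges
-- strictly decrease a rank bounded by n
def TGood (n : Nat) (T : List (Option Int)) : Prop :=
  T.length = n ∧
  (∀ (i : Nat) (w : Int), T[i]? = some (some w) → 0 ≤ w ∧ w.toNat < n) ∧
  ∃ μ : Int → Nat, (∀ x, μ x ≤ n) ∧
    ∀ (i : Nat) (w : Int), T[i]? = some (some w) → μ w < μ i

lemma count_true_set (l : List Bool) (i : Nat) (h : l[i]? = some false) :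
    (l.set i true).count true = l.count true + 1 := by
  induction l generalizing i with
  | nil => simp at h
  | cons a t ih =>
    cases i with
    | zero => simp_all
    | succ j => simp_all [List.count_cons]; omega

lemma count_true_lt (l : List Bool) (i : Nat) (h : l[i]? = some false) :
    l.count true < l.length := by
  induction l generalizing i with
  | nil => simp at h
  | cons a t ih =>
    cases i with
    | zero =>
      simp at h; subst h
      have := List.count_le_length (l := t) (a := true)
      simp; omega
    | succ j =>
      simp at h
      have := ih j h
      have h2 : (if a == true then 1 else 0) ≤ 1 := by split <;> omega
      simp only [List.count_cons, List.length_cons]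
      omega

lemma argmin_prop (key : List (Option Int)) (visited : List Bool) (n : Nat) :
    (mstArgmin key visited n).1 = -1 ∨
      (0 ≤ (mstArgmin key visited n).1 ∧ (mstArgmin key visited n).1.toNat < n ∧
        visited.getD (mstArgmin key visited n).1.toNat true = false) := by
  have aux : ∀ (l : List Int) (p : Int × Option Int),
      (∀ v ∈ l, 0 ≤ v ∧ v.toNat < n) →
      (p.1 = -1 ∨ (0 ≤ p.1 ∧ p.1.toNat < n ∧ visited.getD p.1.toNat true = false)) →
      ((l.foldl
        (fun p v =>
          if !(visited.getD v.toNat true) && ltO (key.getD v.toNat none) p.2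
          then (v, key.getD v.toNat none) else p) p).1 = -1 ∨
        (0 ≤ (l.foldl
        (fun p v =>
          if !(visited.getD v.toNat true) && ltO (key.getD v.toNat none) p.2
          then (v, key.getD v.toNat none) else p) p).1 ∧
         (l.foldl
        (fun p v =>
          if !(visited.getD v.toNat true) && ltO (key.getD v.toNat none) p.2
          then (v, key.getD v.toNat none) else p) p).1.toNat < n ∧
         visited.getD (l.foldl
        (fun p v =>
          if !(visited.getD v.toNat true) && ltO (key.getD v.toNat none) p.2
          then (v, key.getD v.toNat none) else p) p).1.toNat true = false)) := by
    intro l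
    induction l with
    | nil => intro p _ hp; exact hp
    | cons v t ih =>
      intro p hmem hp
      simp only [List.foldl_cons]
      by_cases hc : (!(visited.getD v.toNat true) && ltO (key.getD v.toNat none) p.2) = true
      · rw [if_pos hc]
        refine ih _ (fun w hw => hmem w (List.mem_cons_of_mem _ hw)) ?_
        right
        obtain ⟨h0, hn⟩ := hmem v (List.mem_cons_self ..)
        have := (Bool.and_eq_true _ _).mp hc
        exact ⟨h0, hn, by simpa using this.1⟩
      · rw [if_neg hc]
        exact ih _ (fun w hw => hmem w (List.mem_cons_of_mem _ hw)) hp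
  unfold mstArgmin
  refine aux _ _ (fun v hv => ?_) (Or.inl rfl)
  rw [PySem.List.mem_pyRange_one] at hv
  omega

lemma update_spec (c : List (List Int)) (u : Int) (visited' : List Bool) :
    ∀ (l : List Int) (key parent : List (Option Int)),
      ((l.foldl (mstUpdate c u visited') (key, parent)).2.length = parent.length) ∧
      ((l.foldl (mstUpdate c u visited') (key, parent)).1.length = key.length) ∧
      ∀ i : Nat,
        (l.foldl (mstUpdate c u visited') (key, parent)).2[i]? = parent[i]? ∨
        ((l.foldl (mstUpdate c u visited') (key, parent)).2[i]? = some (some u) ∧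
          visited'.getD i true = false) := by
  intro l
  induction l with
  | nil => intro key parent; exact ⟨rfl, rfl, fun i => Or.inl rfl⟩
  | cons v t ih =>
    intro key parent
    simp only [List.foldl_cons]
    by_cases hc : (!(visited'.getD v.toNat true) && ltCO (costOf c u v) (key.getD v.toNat none)) = true
    · have hstep : mstUpdate c u visited' (key, parent) v =
          (key.set v.toNat (costOf c u v), parent.set v.toNat (some u)) := by
        unfold mstUpdate; rw [if_pos hc]
      rw [hstep]
      obtain ⟨hl, hk, hs⟩ := ih (key.set v.toNat (costOf c u v)) (parent.set v.toNat (some u))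
      refine ⟨by rw [hl]; simp, by rw [hk]; simp, fun i => ?_⟩
      rcases hs i with h | h
      · rw [List.getElem?_set] at h
        by_cases hvi : v.toNat = i
        · subst hvi
          by_cases hrange : v.toNat < parent.length
          · right
            refine ⟨by rw [h]; simp [hrange], ?_⟩
            have := (Bool.and_eq_true _ _).mp hc
            simpa using this.1
          · left
            rw [h]
            simp [hrange]
        · left; rw [h]; simp [hvi]
      · exact Or.inr h
    · have hstep : mstUpdate c u visited' (key, parent) v = (key, parent) := by
        unfold mstUpdate; rw [if_neg hc]
      rw [hstep]
      exact ih key parent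

lemma minv_tgood {n : Nat} {parent : List (Option Int)} {visited : List Bool}
    (h : MInv n parent visited) : TGood n parent := by
  obtain ⟨hp, hv, μ, hb, hvt, hvf, hedge⟩ := h
  refine ⟨hp, fun i w he => ?_, μ, hb, fun i w he => (hedge i w he).2.2⟩
  obtain ⟨hw0, hwv, _⟩ := hedge i w he
  refine ⟨hw0, ?_⟩
  have : w.toNat < visited.length := by
    by_contra hcon
    rw [List.getElem?_eq_none (by omega)] at hwv
    simp at hwv
  omega

lemma getD_true_false (l : List Bool) (i : Nat) (h : l.getD i true = false) :
    l[i]? = some false := by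
  rw [List.getD_eq_getElem?_getD] at h
  cases hx : l[i]? with
  | none => rw [hx] at h; simp at h
  | some b => rw [hx] at h; simp at h; rw [h]

lemma step_inv (c : List (List Int)) (n : Nat) (key parent : List (Option Int))
    (visited : List Bool) (hinv : MInv n parent visited)
    (hu : (mstArgmin key visited n).1 ≠ -1) :
    MInv n
      ((PySem.List.pyRange 0 n 1).foldl
        (mstUpdate c (mstArgmin key visited n).1 (visited.set (mstArgmin key visited n).1.toNat true))
        (key, parent)).2
      (visited.set (mstArgmin key visited n).1.toNat true) := by
  obtain ⟨hpl, hvl, μ, hb, hvt, hvf, hedge⟩ := hinv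
  rcases argmin_prop key visited n with h | ⟨hu0, hun, huf⟩
  · exact absurd h hu
  set u := (mstArgmin key visited n).1 with hudef
  have husome : visited[u.toNat]? = some false := getD_true_false _ _ huf
  obtain ⟨hl2, _, hs⟩ := update_spec c u (visited.set u.toNat true)
      (PySem.List.pyRange 0 ↑n 1) key parent
  have hcnt : (visited.set u.toNat true).count true = visited.count true + 1 :=
    count_true_set visited u.toNat husome
  have hcltn : visited.count true < n := by
    have := count_true_lt visited u.toNat husome
    omega
  refine ⟨by rw [hl2]; exact hpl, by simp [hvl], ?_⟩
  refine ⟨fun x => if x = u then visited.count true else μ x, ?_, ?_, ?_, ?_⟩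
  · intro x
    by_cases hx : x = u <;> simp [hx]
    · omega
    · exact hb x
  · intro i hi
    rw [List.getElem?_set] at hi
    by_cases hui : u.toNat = i
    · subst hui
      have : (u.toNat : Int) = u := Int.toNat_of_nonneg hu0
      rw [this]
      simp [hcnt]
    · rw [if_neg hui] at hi
      have hne : (i : Int) ≠ u := by
        intro hcon
        apply hui
        omega
      have := hvt i hi
      beta_reduce
      rw [if_neg hne]
      omega
  · intro i hi
    rw [List.getElem?_set] at hi
    by_cases hui : u.toNat = i
    · subst hui
      rw [if_pos rfl] at hi
      split at hi <;> simp at hi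
    · rw [if_neg hui] at hi
      have hne : (i : Int) ≠ u := by intro hcon; apply hui; omega
      beta_reduce
      rw [if_neg hne]
      exact hvf i hi
  · intro i w hw
    rcases hs i with h | ⟨h, hvis⟩
    · rw [h] at hw
      obtain ⟨hw0, hwvis, hwlt⟩ := hedge i w hw
      have hwne : w.toNat ≠ u.toNat := by
        intro hcon
        rw [hcon, husome] at hwvis
        simp at hwvis
      have hwneu : w ≠ u := by intro hcon; apply hwne; rw [hcon]
      refine ⟨hw0, ?_, ?_⟩
      · rw [List.getElem?_set, if_neg (fun hc => hwne hc.symm)]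
        exact hwvis
      · beta_reduce
        rw [if_neg hwneu]
        by_cases hiu : (i : Int) = u
        · rw [if_pos hiu]
          have h5 := hvt w.toNat hwvis
          rwa [Int.toNat_of_nonneg hw0] at h5
        · rw [if_neg hiu]
          exact hwlt
    · rw [h] at hw
      have hwu : w = u := by simpa using hw.symm
      subst hwu
      have hvis' : (visited.set u.toNat true)[i]? = some false := getD_true_false _ _ hvis
      have hiu : u.toNat ≠ i := by
        intro hcon
        rw [List.getElem?_set, if_pos hcon] at hvis'
        split at hvis' <;> simp at hvis'
      have hineu : (i : Int) ≠ u := by intro hcon; apply hiu; omega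
      have hioldf : visited[i]? = some false := by
        rwa [List.getElem?_set, if_neg hiu] at hvis'
      refine ⟨hu0, ?_, ?_⟩
      · rw [List.getElem?_set, if_pos rfl]
        have : u.toNat < visited.length := by omega
        simp [this]
      · beta_reduce
        rw [if_pos rfl, if_neg hineu]
        have := hvf i hioldf
        omega

lemma loop_good (c : List (List Int)) (n : Nat) :
    ∀ (f : Nat) (key parent : List (Option Int)) (visited : List Bool),
      MInv n parent visited → TGood n (mstLoop c n f key parent visited) := by
  intro f
  induction f with
  | zero => intro key parent visited hinv; exact minv_tgood hinv
  | succ f ih =>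
    intro key parent visited hinv
    rw [mstLoop]
    by_cases h : (mstArgmin key visited n).1 = -1
    · simp only [h, if_pos rfl]
      exact minv_tgood hinv
    · simp only [if_neg h]
      exact ih _ _ _ (step_inv c n key parent visited hinv h)

lemma mst_good (G c : List (List Int)) : TGood G.length (MST_Prim G c 0) := by
  unfold MST_Prim
  apply loop_good
  refine ⟨by simp, by simp, fun _ => G.length, fun _ => le_refl _, ?_, ?_, ?_⟩
  · intro i hi
    rw [List.getElem?_replicate] at hi
    split at hi <;> simp at hi
  · intro i _; rfl
  · intro i w hw
    rw [List.getElem?_replicate] at hw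
    split at hw <;> simp at hw

-- ---------- simulation of the B-side Prim against the A-side Prim ----------

-- the frontier list a (key, visited) array pair denotes
def pendFn (key : List (Option Int)) (visited : List Bool) (v : Int) :
    Option (Int × Option Int) :=
  if visited.getD v.toNat true then none else some (v, key.getD v.toNat none)

def pendOf (key : List (Option Int)) (visited : List Bool) (n : Nat) :
    List (Int × Option Int) :=
  (PySem.List.pyRange 0 n 1).filterMap (pendFn key visited)

-- B's parent dict agrees with A's parent array (negatives are never keys)
def dictMatch (d : PySem.Dict Int Int) (p : List (Option Int)) : Prop :=
  ∀ v : Int, d.get? v = if 0 ≤ v then p.getD v.toNat none else none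

lemma getD_set_ne {α : Type} (l : List α) (i j : Nat) (a dflt : α) (h : i ≠ j) :
    (l.set i a).getD j dflt = l.getD j dflt := by
  simp [List.getD_eq_getElem?_getD, List.getElem?_set_ne h]

lemma getD_set_self_of_lt {α : Type} (l : List α) (i : Nat) (a dflt : α) (h : i < l.length) :
    (l.set i a).getD i dflt = a := by
  simp [List.getD_eq_getElem?_getD, List.getElem?_set_self, h]

lemma getD_set_true (l : List Bool) (i : Nat) : (l.set i true).getD i true = true := by
  by_cases h : i < l.length
  · exact getD_set_self_of_lt _ _ _ _ h
  · rw [List.getD_eq_getElem?_getD, List.getElem?_eq_none (by simp; omega)]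
    rfl

lemma getElem?_eq_some_getD {α : Type} (l : List α) (i : Nat) (dflt : α) (h : i < l.length) :
    l[i]? = some (l.getD i dflt) := by
  rw [List.getD_eq_getElem?_getD, List.getElem?_eq_getElem h]
  rfl

lemma pyRange0_nodup (n : Nat) : (PySem.List.pyRange 0 n 1).Nodup := by
  rw [PySem.List.pyRange_zero_natCast]
  exact List.Nodup.map (fun a b h => by exact_mod_cast h) List.nodup_range

lemma pyRange0_mem (n : Nat) : ∀ v ∈ PySem.List.pyRange 0 (n : Int) 1, 0 ≤ v ∧ v.toNat < n := by
  intro v hv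
  rw [PySem.List.mem_pyRange_one] at hv
  omega

lemma dictMatch_insert (d : PySem.Dict Int Int) (p : List (Option Int)) (v u : Int)
    (hv0 : 0 ≤ v) (hvl : v.toNat < p.length) (hd : dictMatch d p) :
    dictMatch (d.insert v u) (p.set v.toNat (some u)) := by
  intro x
  rw [PySem.Dict.get?_insert]
  by_cases hxv : x = v
  · subst hxv
    rw [if_pos rfl, if_pos hv0, getD_set_self_of_lt _ _ _ _ hvl]
  · rw [if_neg hxv, hd x]
    by_cases hx0 : 0 ≤ x
    · rw [if_pos hx0, if_pos hx0, getD_set_ne _ _ _ _ _ (by omega)]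
    · rw [if_neg hx0, if_neg hx0]

lemma pendFn_set_ne (k : List (Option Int)) (vis : List Bool) (v : Int) (j : Nat)
    (a : Option Int) (h : v.toNat ≠ j) :
    pendFn (k.set j a) vis v = pendFn k vis v := by
  unfold pendFn
  rw [getD_set_ne _ _ _ _ _ (fun hc => h hc.symm)]

-- the A-side relax fold never touches an index outside its list
lemma foldA_untouched (c : List (List Int)) (u : Int) (vis : List Bool) :
    ∀ (S : List Int) (k p : List (Option Int)) (j : Nat), (∀ v ∈ S, v.toNat ≠ j) →
      (S.foldl (mstUpdate c u vis) (k, p)).1.getD j none = k.getD j none ∧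
      (S.foldl (mstUpdate c u vis) (k, p)).2.getD j none = p.getD j none := by
  intro S
  induction S with
  | nil => intro k p j _; exact ⟨rfl, rfl⟩
  | cons v t ih =>
    intro k p j hj
    simp only [List.foldl_cons]
    by_cases hc : (!(vis.getD v.toNat true) && ltCO (costOf c u v) (k.getD v.toNat none)) = true
    · have hstep : mstUpdate c u vis (k, p) v =
          (k.set v.toNat (costOf c u v), p.set v.toNat (some u)) := by
        unfold mstUpdate; rw [if_pos hc]
      rw [hstep]
      obtain ⟨h1, h2⟩ := ih _ _ j (fun w hw => hj w (List.mem_cons_of_mem _ hw))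
      exact ⟨by rw [h1, getD_set_ne _ _ _ _ _ (hj v (List.mem_cons_self ..))],
             by rw [h2, getD_set_ne _ _ _ _ _ (hj v (List.mem_cons_self ..))]⟩
    · have hstep : mstUpdate c u vis (k, p) v = (k, p) := by
        unfold mstUpdate; rw [if_neg hc]
      rw [hstep]
      exact ih _ _ j (fun w hw => hj w (List.mem_cons_of_mem _ hw))

-- the A-side relax fold never touches a visited index
lemma foldA_visited (c : List (List Int)) (u : Int) (vis : List Bool) :
    ∀ (S : List Int) (k p : List (Option Int)) (j : Nat), vis.getD j true = true →
      (S.foldl (mstUpdate c u vis) (k, p)).2.getD j none = p.getD j none := by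
  intro S
  induction S with
  | nil => intro k p j _; rfl
  | cons v t ih =>
    intro k p j hj
    simp only [List.foldl_cons]
    by_cases hc : (!(vis.getD v.toNat true) && ltCO (costOf c u v) (k.getD v.toNat none)) = true
    · have hvj : v.toNat ≠ j := by
        intro hcon
        rw [Bool.and_eq_true] at hc
        rw [hcon, hj] at hc
        simp at hc
      have hstep : mstUpdate c u vis (k, p) v =
          (k.set v.toNat (costOf c u v), p.set v.toNat (some u)) := by
        unfold mstUpdate; rw [if_pos hc]
      rw [hstep, ih _ _ j hj, getD_set_ne _ _ _ _ _ hvj]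
    · have hstep : mstUpdate c u vis (k, p) v = (k, p) := by
        unfold mstUpdate; rw [if_neg hc]
      rw [hstep]
      exact ih _ _ j hj

-- vertex 0 stays parentless through the whole loop once it is visited
lemma loop_p0 (c : List (List Int)) (n : Nat) :
    ∀ (f : Nat) (k p : List (Option Int)) (vis : List Bool),
      vis.getD 0 true = true → p.getD 0 none = none →
      (mstLoop c n f k p vis).getD 0 none = none := by
  intro f
  induction f with
  | zero => intro k p vis _ hp; exact hp
  | succ f ih =>
    intro k p vis hv hp
    simp only [mstLoop]
    by_cases h : (mstArgmin k vis n).1 = -1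
    · rw [if_pos h]; exact hp
    · rw [if_neg h]
      have hv2 : (vis.set (mstArgmin k vis n).1.toNat true).getD 0 true = true := by
        by_cases h0 : (mstArgmin k vis n).1.toNat = 0
        · rw [h0]; exact getD_set_true _ _
        · rw [getD_set_ne _ _ _ _ _ h0]; exact hv
      apply ih
      · exact hv2
      · rw [foldA_visited c _ _ _ _ _ 0 hv2]
        exact hp

-- one full relax pass: B's fold over the frontier computes exactly A's fold over range(n)
lemma relax_sim (c : List (List Int)) (n : Nat) (u : Int) (vis : List Bool)
    (hfull : ∀ x v : Int, 0 ≤ x → 0 ≤ v → x.toNat < n → v.toNat < n → x ≠ v →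
      costOf c x v = some (bCost c x v))
    (hu0 : 0 ≤ u) (hun : u.toNat < n) (hvisu : vis.getD u.toNat true = true) :
    ∀ (S : List Int), S.Nodup → (∀ v ∈ S, 0 ≤ v ∧ v.toNat < n) →
    ∀ (k p : List (Option Int)) (d : PySem.Dict Int Int) (acc : List (Int × Option Int)),
      k.length = n → p.length = n → dictMatch d p →
      ((S.filterMap (pendFn k vis)).foldl (bRelaxStep c u) (acc, d)).1 =
        acc ++ S.filterMap (pendFn (S.foldl (mstUpdate c u vis) (k, p)).1 vis) ∧
      dictMatch ((S.filterMap (pendFn k vis)).foldl (bRelaxStep c u) (acc, d)).2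
        (S.foldl (mstUpdate c u vis) (k, p)).2 := by
  intro S
  induction S with
  | nil =>
    intro _ _ k p d acc _ _ hd
    exact ⟨by simp, hd⟩
  | cons v t ih =>
    intro hnd hmem k p d acc hk hp hd
    have hndt : t.Nodup := (List.nodup_cons.mp hnd).2
    have hvnt : v ∉ t := (List.nodup_cons.mp hnd).1
    obtain ⟨hv0, hvn⟩ := hmem v (List.mem_cons_self ..)
    have hmemt : ∀ w ∈ t, 0 ≤ w ∧ w.toNat < n :=
      fun w hw => hmem w (List.mem_cons_of_mem _ hw)
    have htne : ∀ w ∈ t, w.toNat ≠ v.toNat := by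
      intro w hw hcon
      obtain ⟨hw0, _⟩ := hmemt w hw
      exact hvnt (by rw [show w = v by omega] at hw; exact hw)
    by_cases hvis : vis.getD v.toNat true = true
    · have hpf : pendFn k vis v = none := by unfold pendFn; rw [if_pos hvis]
      have hstep : mstUpdate c u vis (k, p) v = (k, p) := by
        unfold mstUpdate
        rw [hvis]
        simp
      rw [List.filterMap_cons_none hpf]
      simp only [List.foldl_cons]
      rw [hstep]
      obtain ⟨h1, h2⟩ := ih hndt hmemt k p d acc hk hp hd
      have hpfK : pendFn (t.foldl (mstUpdate c u vis) (k, p)).1 vis v = none := by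
        unfold pendFn; rw [if_pos hvis]
      exact ⟨by rw [h1, List.filterMap_cons_none hpfK], h2⟩
    · have hvisF : vis.getD v.toNat true = false := by simpa using hvis
      have hneuv : u ≠ v := by
        intro hcon
        rw [← hcon] at hvisF
        rw [hvisu] at hvisF
        simp at hvisF
      have hcost : costOf c u v = some (bCost c u v) :=
        hfull u v hu0 hv0 hun hvn hneuv
      have hpf : pendFn k vis v = some (v, k.getD v.toNat none) := by
        unfold pendFn; rw [hvisF]; simp
      have hvlen : v.toNat < k.length := by omega
      rw [List.filterMap_cons_some hpf]
      simp only [List.foldl_cons]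
      -- whether this relaxation improves v's key
      by_cases himp : (match k.getD v.toNat none with
          | none => true
          | some kk => decide (bCost c u v < kk)) = true
      · -- improving step
        have hcond : (!(vis.getD v.toNat true) &&
            ltCO (costOf c u v) (k.getD v.toNat none)) = true := by
          rw [hvisF, hcost]
          cases hkv : k.getD v.toNat none with
          | none => rfl
          | some kk =>
            rw [hkv] at himp
            simp only [ltCO, ltO]
            simpa using himp
        have hstep : mstUpdate c u vis (k, p) v =
            (k.set v.toNat (some (bCost c u v)), p.set v.toNat (some u)) := by
          unfold mstUpdate; rw [if_pos hcond, hcost]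
        have hbstep : bRelaxStep c u (acc, d) (v, k.getD v.toNat none) =
            (acc ++ [(v, some (bCost c u v))], d.insert v u) := by
          unfold bRelaxStep
          rw [if_pos himp]
        rw [hstep, hbstep]
        have hfmc : t.filterMap (pendFn k vis) =
            t.filterMap (pendFn (k.set v.toNat (some (bCost c u v))) vis) :=
          List.filterMap_congr fun w hw =>
            (pendFn_set_ne k vis w v.toNat _ (htne w hw)).symm
        rw [hfmc]
        obtain ⟨h1, h2⟩ := ih hndt hmemt
          (k.set v.toNat (some (bCost c u v))) (p.set v.toNat (some u))
          (d.insert v u) (acc ++ [(v, some (bCost c u v))])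
          (by simp [hk]) (by simp [hp])
          (dictMatch_insert d p v u hv0 (by omega) hd)
        refine ⟨?_, h2⟩
        rw [h1]
        have hKv : (t.foldl (mstUpdate c u vis)
            (k.set v.toNat (some (bCost c u v)), p.set v.toNat (some u))).1.getD
              v.toNat none = some (bCost c u v) := by
          rw [(foldA_untouched c u vis t _ _ v.toNat htne).1,
            getD_set_self_of_lt _ _ _ _ (by simpa using hvlen)]
        have hpfK : pendFn (t.foldl (mstUpdate c u vis)
            (k.set v.toNat (some (bCost c u v)), p.set v.toNat (some u))).1 vis v =
            some (v, some (bCost c u v)) := by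
          unfold pendFn
          rw [hvisF, hKv]
          simp
        rw [List.filterMap_cons_some hpfK]
        simp
      · -- non-improving step: the key stays, nothing is written
        have hcond : (!(vis.getD v.toNat true) &&
            ltCO (costOf c u v) (k.getD v.toNat none)) = false := by
          rw [hvisF, hcost]
          cases hkv : k.getD v.toNat none with
          | none => rw [hkv] at himp; simp at himp
          | some kk =>
            rw [hkv] at himp
            simp only [ltCO, ltO]
            simpa using himp
        have hstep : mstUpdate c u vis (k, p) v = (k, p) := by
          unfold mstUpdate; rw [hcond]; simp
        have hbstep : bRelaxStep c u (acc, d) (v, k.getD v.toNat none) =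
            (acc ++ [(v, k.getD v.toNat none)], d) := by
          unfold bRelaxStep
          rw [if_neg (by simpa using himp)]
        rw [hstep, hbstep]
        obtain ⟨h1, h2⟩ := ih hndt hmemt k p d (acc ++ [(v, k.getD v.toNat none)])
          hk hp hd
        refine ⟨?_, h2⟩
        rw [h1]
        have hKv : (t.foldl (mstUpdate c u vis) (k, p)).1.getD v.toNat none =
            k.getD v.toNat none :=
          (foldA_untouched c u vis t _ _ v.toNat htne).1
        have hpfK : pendFn (t.foldl (mstUpdate c u vis) (k, p)).1 vis v =
            some (v, k.getD v.toNat none) := by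
          unfold pendFn
          rw [hvisF, hKv]
          simp
        rw [List.filterMap_cons_some hpfK]
        simp

-- the argmin scan and B's pick scan agree
def pickRel (n : Nat) (vis : List Bool) (pA : Int × Option Int) (b : Option (Int × Int)) : Prop :=
  (pA = (-1, none) ∧ b = none) ∨
  (∃ v kk, 0 ≤ v ∧ v.toNat < n ∧ vis.getD v.toNat true = false ∧
    pA = (v, some kk) ∧ b = some (kk, v))

lemma pick_sim (n : Nat) (k : List (Option Int)) (vis : List Bool) :
    ∀ (S : List Int), (∀ v ∈ S, 0 ≤ v ∧ v.toNat < n) →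
    ∀ (pA : Int × Option Int) (b : Option (Int × Int)), pickRel n vis pA b →
      pickRel n vis
        (S.foldl
          (fun p v =>
            if !(vis.getD v.toNat true) && ltO (k.getD v.toNat none) p.2
            then (v, k.getD v.toNat none) else p) pA)
        ((S.filterMap (pendFn k vis)).foldl
          (fun best vk =>
            match vk.2 with
            | none => best
            | some kk =>
              match best with
              | none => some (kk, vk.1)
              | some b => if kk < b.1 then some (kk, vk.1) else some b) b) := by
  intro S
  induction S with
  | nil => intro _ pA b h; exact h
  | cons v t ih =>
    intro hmem pA b hrel
    obtain ⟨hv0, hvn⟩ := hmem v (List.mem_cons_self ..)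
    have iht := ih (fun w hw => hmem w (List.mem_cons_of_mem _ hw))
    by_cases hvis : vis.getD v.toNat true = true
    · have hpf : pendFn k vis v = none := by unfold pendFn; rw [if_pos hvis]
      rw [List.filterMap_cons_none hpf]
      simp only [List.foldl_cons]
      have hA' : (if !(vis.getD v.toNat true) && ltO (k.getD v.toNat none) pA.2
          then (v, k.getD v.toNat none) else pA) = pA := by
        rw [hvis]; simp
      rw [hA']
      exact iht pA b hrel
    · have hvisF : vis.getD v.toNat true = false := by simpa using hvis
      have hpf : pendFn k vis v = some (v, k.getD v.toNat none) := by
        unfold pendFn; rw [hvisF]; simp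
      rw [List.filterMap_cons_some hpf]
      simp only [List.foldl_cons]
      cases hk : k.getD v.toNat none with
      | none =>
        have hA' : (if !(vis.getD v.toNat true) && ltO (none : Option Int) pA.2
            then (v, (none : Option Int)) else pA) = pA := by
          simp [ltO]
        rw [hA']
        exact iht pA b hrel
      | some kk =>
        rcases hrel with ⟨hA, hB⟩ | ⟨v0, k0, hv00, hv0n, hv0vis, hA, hB⟩
        · have hA' : (if !(vis.getD v.toNat true) && ltO (some kk) pA.2
              then (v, some kk) else pA) = (v, some kk) := by
            rw [hA, hvisF]
            simp [ltO]
          rw [hA']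
          exact iht _ _ (Or.inr ⟨v, kk, hv0, hvn, hvisF, rfl, by rw [hB]⟩)
        · by_cases hlt : kk < k0
          · have hA' : (if !(vis.getD v.toNat true) && ltO (some kk) pA.2
                then (v, some kk) else pA) = (v, some kk) := by
              rw [hA, hvisF]
              simp [ltO, hlt]
            rw [hA']
            exact iht _ _ (Or.inr ⟨v, kk, hv0, hvn, hvisF, rfl, by rw [hB]; simp [hlt]⟩)
          · have hA' : (if !(vis.getD v.toNat true) && ltO (some kk) pA.2
                then (v, some kk) else pA) = (v0, some k0) := by
              rw [hA, hvisF]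
              simp [ltO, hlt]
            rw [hA']
            exact iht _ _ (Or.inr ⟨v0, k0, hv00, hv0n, hv0vis, rfl, by rw [hB]; simp [hlt]⟩)

-- removing the picked vertex from the frontier = marking it visited
lemma pend_remove (k : List (Option Int)) (vis : List Bool) (n : Nat) (u' : Int)
    (h0 : 0 ≤ u') :
    (pendOf k vis n).filter (fun vk => vk.1 != u') =
      pendOf k (vis.set u'.toNat true) n := by
  unfold pendOf
  have haux : ∀ S : List Int, (∀ v ∈ S, 0 ≤ v) →
      (S.filterMap (pendFn k vis)).filter (fun vk => vk.1 != u') =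
        S.filterMap (pendFn k (vis.set u'.toNat true)) := by
    intro S
    induction S with
    | nil => intro _; rfl
    | cons v t ih =>
      intro hmem
      have hv0 : (0 : Int) ≤ v := hmem v (List.mem_cons_self ..)
      have iht := ih (fun w hw => hmem w (List.mem_cons_of_mem _ hw))
      simp only [List.filterMap_cons]
      by_cases hvu : v = u'
      · subst hvu
        have h2 : pendFn k (vis.set v.toNat true) v = none := by
          unfold pendFn
          rw [getD_set_true, if_pos rfl]
        rw [h2]
        cases h1 : pendFn k vis v with
        | none => rw [iht]
        | some e =>
          have he1 : e.1 = v := by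
            unfold pendFn at h1
            split at h1
            · simp at h1
            · rw [← Option.some_inj.mp h1]
          rw [List.filter_cons, he1, if_neg (by simp), iht]
      · have htoNat : v.toNat ≠ u'.toNat := by omega
        have h2 : pendFn k (vis.set u'.toNat true) v = pendFn k vis v := by
          unfold pendFn
          rw [getD_set_ne _ _ _ _ _ (fun hc => htoNat hc.symm)]
        rw [h2]
        cases h1 : pendFn k vis v with
        | none => rw [iht]
        | some e =>
          have he1 : e.1 = v := by
            unfold pendFn at h1
            split at h1
            · simp at h1
            · rw [← Option.some_inj.mp h1]
          rw [List.filter_cons, he1, if_pos (by simp [hvu]), iht]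
  exact haux _ (fun v hv => (pyRange0_mem n v hv).1)

lemma bLoop_succ_none (c : List (List Int)) (f : Nat) (u : Int)
    (pending : List (Int × Option Int)) (parent : PySem.Dict Int Int)
    (h : bPick ((pending.foldl (bRelaxStep c u) ([], parent))).1 = none) :
    bLoop c (f + 1) u pending parent =
      (pending.foldl (bRelaxStep c u) ([], parent)).2 := by
  simp only [bLoop]
  rw [h]

lemma bLoop_succ_some (c : List (List Int)) (f : Nat) (u : Int)
    (pending : List (Int × Option Int)) (parent : PySem.Dict Int Int) (b : Int × Int)
    (h : bPick ((pending.foldl (bRelaxStep c u) ([], parent))).1 = some b) :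
    bLoop c (f + 1) u pending parent =
      bLoop c f b.2
        ((pending.foldl (bRelaxStep c u) ([], parent)).1.filter (fun vk => vk.1 != b.2))
        (pending.foldl (bRelaxStep c u) ([], parent)).2 := by
  simp only [bLoop]
  rw [h]

-- the main simulation: one B iteration (relax; pick) tracks one A iteration (pick; relax)
lemma prim_sim (c : List (List Int)) (n : Nat)
    (hfull : ∀ x v : Int, 0 ≤ x → 0 ≤ v → x.toNat < n → v.toNat < n → x ≠ v →
      costOf c x v = some (bCost c x v)) :
    ∀ (f : Nat) (u : Int) (k p : List (Option Int)) (vis : List Bool)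
      (d : PySem.Dict Int Int),
      0 ≤ u → u.toNat < n → vis.getD u.toNat true = true →
      k.length = n → p.length = n → dictMatch d p →
      dictMatch (bLoop c (f + 1) u (pendOf k vis n) d)
        (mstLoop c n f
          ((PySem.List.pyRange 0 n 1).foldl (mstUpdate c u vis) (k, p)).1
          ((PySem.List.pyRange 0 n 1).foldl (mstUpdate c u vis) (k, p)).2 vis) := by
  intro f
  induction f with
  | zero =>
    intro u k p vis d hu0 hun hvisu hk hp hd
    obtain ⟨h1, h2⟩ := relax_sim c n u vis hfull hu0 hun hvisu
      (PySem.List.pyRange 0 n 1) (pyRange0_nodup n) (pyRange0_mem n) k p d [] hk hp hd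
    have hb : bLoop c 1 u (pendOf k vis n) d =
        ((pendOf k vis n).foldl (bRelaxStep c u) ([], d)).2 := by
      simp only [bLoop]
      cases bPick ((pendOf k vis n).foldl (bRelaxStep c u) ([], d)).1 with
      | none => rfl
      | some b => rfl
    rw [hb]
    simp only [mstLoop]
    exact h2
  | succ f ihf =>
    intro u k p vis d hu0 hun hvisu hk hp hd
    obtain ⟨h1, h2⟩ := relax_sim c n u vis hfull hu0 hun hvisu
      (PySem.List.pyRange 0 n 1) (pyRange0_nodup n) (pyRange0_mem n) k p d [] hk hp hd
    set KP := (PySem.List.pyRange 0 n 1).foldl (mstUpdate c u vis) (k, p) with hKP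
    have h1' : ((pendOf k vis n).foldl (bRelaxStep c u) ([], d)).1 = pendOf KP.1 vis n := by
      simpa using h1
    have hpickRel : pickRel n vis (mstArgmin KP.1 vis n) (bPick (pendOf KP.1 vis n)) :=
      pick_sim n KP.1 vis (PySem.List.pyRange 0 n 1) (pyRange0_mem n)
        (-1, none) none (Or.inl ⟨rfl, rfl⟩)
    have hKlen : KP.1.length = n := by
      rw [(update_spec c u vis (PySem.List.pyRange 0 n 1) k p).2.1]
      exact hk
    have hPlen : KP.2.length = n := by
      rw [(update_spec c u vis (PySem.List.pyRange 0 n 1) k p).1]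
      exact hp
    cases hpk : bPick (pendOf KP.1 vis n) with
    | none =>
      have hpk' : bPick ((pendOf k vis n).foldl (bRelaxStep c u) ([], d)).1 = none := by
        rw [h1']; exact hpk
      rw [hpk] at hpickRel
      rcases hpickRel with ⟨hA, _⟩ | ⟨v', kk, _, _, _, _, hB⟩
      · rw [bLoop_succ_none c (f + 1) u _ d hpk']
        simp only [mstLoop]
        rw [hA]
        rw [show ((-1 : Int), (none : Option Int)).1 = -1 from rfl, if_pos rfl]
        exact h2
      · simp at hB
    | some b =>
      have hpk' : bPick ((pendOf k vis n).foldl (bRelaxStep c u) ([], d)).1 = some b := by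
        rw [h1']; exact hpk
      rw [hpk] at hpickRel
      rcases hpickRel with ⟨_, hB⟩ | ⟨v', kk, hv'0, hv'n, hv'vis, hA, hB⟩
      · simp at hB
      · have hb : b = (kk, v') := Option.some_injective _ hB
        subst hb
        rw [bLoop_succ_some c (f + 1) u _ d (kk, v') hpk']
        simp only [mstLoop]
        rw [hA]
        rw [show ((v' : Int), some kk).1 = v' from rfl]
        rw [if_neg (by omega : ¬(v' = -1))]
        rw [h1', pend_remove KP.1 vis n v' hv'0]
        exact ihf v' KP.1 KP.2 (vis.set v'.toNat true)
          ((pendOf k vis n).foldl (bRelaxStep c u) ([], d)).2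
          hv'0 hv'n (getD_set_true _ _) hKlen hPlen h2

-- the initial argmin picks vertex 0
lemma argmin_init (n : Nat) (hn : 1 ≤ n) :
    mstArgmin ((List.replicate n (none : Option Int)).set 0 (some 0))
      (List.replicate n false) n = (0, some 0) := by
  unfold mstArgmin
  rw [PySem.List.pyRange_one_cons (by omega : (0 : Int) < n)]
  have hk0 : ((List.replicate n (none : Option Int)).set 0 (some 0)).getD (0 : Int).toNat none
      = some 0 := by
    rw [Int.toNat_zero]
    exact getD_set_self_of_lt _ _ _ _ (by simp; omega)
  have hv0 : (List.replicate n false).getD (0 : Int).toNat true = false := by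
    rw [Int.toNat_zero, List.getD_eq_getElem?_getD, List.getElem?_replicate]
    simp only [if_pos (by omega : 0 < n)]
    rfl
  simp only [List.foldl_cons, hv0, hk0]
  simp only [Bool.not_false, Bool.true_and]
  rw [if_pos (show ltO (some 0) none = true from rfl)]
  have haux : ∀ (S : List Int), (∀ v ∈ S, (1 : Int) ≤ v) →
      S.foldl
        (fun p v =>
          if !((List.replicate n false).getD v.toNat true) &&
              ltO (((List.replicate n (none : Option Int)).set 0 (some 0)).getD v.toNat none) p.2
          then (v, ((List.replicate n (none : Option Int)).set 0 (some 0)).getD v.toNat none)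
          else p) ((0 : Int), some 0) = ((0 : Int), some 0) := by
    intro S
    induction S with
    | nil => intro _; rfl
    | cons v t ih =>
      intro hmem
      have hv1 := hmem v (List.mem_cons_self ..)
      have hkv : ((List.replicate n (none : Option Int)).set 0 (some 0)).getD v.toNat none
          = none := by
        rw [getD_set_ne _ _ _ _ _ (by omega), List.getD_eq_getElem?_getD,
          List.getElem?_replicate]
        split <;> rfl
      simp only [List.foldl_cons, hkv,
        show ∀ o : Option Int, ltO none o = false from fun _ => rfl, Bool.and_false]
      rw [if_neg (by simp)]
      exact ih (fun w hw => hmem w (List.mem_cons_of_mem _ hw))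
  refine haux _ (fun v hv => ?_)
  rw [PySem.List.mem_pyRange_one] at hv
  omega

-- the initial frontier is range(1, n) with infinite keys
lemma pend0_eq (n : Nat) (hn : 1 ≤ n) :
    pendOf ((List.replicate n (none : Option Int)).set 0 (some 0))
      ((List.replicate n false).set 0 true) n =
      (PySem.List.pyRange 1 n 1).map (fun v => (v, (none : Option Int))) := by
  unfold pendOf
  rw [PySem.List.pyRange_one_cons (by omega : (0 : Int) < n)]
  rw [List.filterMap_cons]
  have h0 : pendFn ((List.replicate n (none : Option Int)).set 0 (some 0))
      ((List.replicate n false).set 0 true) 0 = none := by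
    unfold pendFn
    rw [Int.toNat_zero, getD_set_true, if_pos rfl]
  rw [h0]
  have hcg : ∀ v ∈ PySem.List.pyRange (0 + 1 : Int) n 1,
      pendFn ((List.replicate n (none : Option Int)).set 0 (some 0))
        ((List.replicate n false).set 0 true) v = some (v, (none : Option Int)) := by
    intro v hv
    rw [PySem.List.mem_pyRange_one] at hv
    unfold pendFn
    have hvis : ((List.replicate n false).set 0 true).getD v.toNat true = false := by
      rw [getD_set_ne _ _ _ _ _ (by omega), List.getD_eq_getElem?_getD,
        List.getElem?_replicate, if_pos (by omega)]
      rfl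
    have hkey : ((List.replicate n (none : Option Int)).set 0 (some 0)).getD v.toNat none
        = none := by
      rw [getD_set_ne _ _ _ _ _ (by omega), List.getD_eq_getElem?_getD,
        List.getElem?_replicate]
      split <;> rfl
    rw [hvis, hkey, if_neg (by simp)]
  rw [List.filterMap_congr hcg]
  show List.filterMap (some ∘ fun v => (v, (none : Option Int))) _ = _
  rw [List.filterMap_eq_map]
  norm_num

-- B's final parent dict agrees with A's final parent array
lemma prim_match (G c : List (List Int)) (hn : 1 ≤ G.length)
    (hfull : ∀ x v : Int, 0 ≤ x → 0 ≤ v → x.toNat < G.length → v.toNat < G.length → x ≠ v →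
      costOf c x v = some (bCost c x v)) :
    dictMatch
      (bLoop c (G.length + 1) 0
        ((PySem.List.pyRange 1 G.length 1).map (fun v => (v, (none : Option Int))))
        PySem.Dict.empty)
      (MST_Prim G c 0) := by
  have h1 : MST_Prim G c 0 =
      mstLoop c G.length G.length
        ((PySem.List.pyRange 0 G.length 1).foldl
          (mstUpdate c 0 ((List.replicate G.length false).set 0 true))
          ((List.replicate G.length (none : Option Int)).set 0 (some 0),
            List.replicate G.length (none : Option Int))).1
        ((PySem.List.pyRange 0 G.length 1).foldl
          (mstUpdate c 0 ((List.replicate G.length false).set 0 true))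
          ((List.replicate G.length (none : Option Int)).set 0 (some 0),
            List.replicate G.length (none : Option Int))).2
        ((List.replicate G.length false).set 0 true) := by
    unfold MST_Prim
    simp only [Int.toNat_zero, mstLoop]
    rw [argmin_init G.length hn]
    rw [show ((0 : Int), some (0 : Int)).1 = 0 from rfl]
    rw [if_neg (by norm_num : ¬((0 : Int) = -1))]
    rw [show (0 : Int).toNat = 0 from rfl]
  rw [h1, ← pend0_eq G.length hn]
  exact prim_sim c G.length hfull G.length 0
    ((List.replicate G.length (none : Option Int)).set 0 (some 0))
    (List.replicate G.length (none : Option Int))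
    ((List.replicate G.length false).set 0 true) PySem.Dict.empty
    (le_refl 0) (by simpa using hn) (getD_set_true _ _)
    (by simp) (by simp)
    (by
      intro v
      rw [PySem.Dict.get?_empty]
      split
      · rw [List.getD_eq_getElem?_getD, List.getElem?_replicate]
        split <;> rfl
      · rfl)

-- vertex 0 never gets a parent
lemma mst_p0 (G c : List (List Int)) (hn : 1 ≤ G.length) :
    (MST_Prim G c 0).getD 0 none = none := by
  unfold MST_Prim
  simp only [Int.toNat_zero, mstLoop]
  rw [argmin_init G.length hn]
  rw [show ((0 : Int), some (0 : Int)).1 = 0 from rfl]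
  rw [if_neg (by norm_num : ¬((0 : Int) = -1))]
  rw [show (0 : Int).toNat = 0 from rfl]
  apply loop_p0
  · exact getD_set_true _ _
  · rw [foldA_visited c 0 _ _ _ _ 0 (getD_set_true _ _)]
    rw [List.getD_eq_getElem?_getD, List.getElem?_replicate]
    split <;> rfl

-- Pre_ gives the cost-agreement hypothesis of the simulation
lemma pre_full (G c : List (List Int)) (hpre : Pre_Approx_TSP_Tour G c) :
    ∀ x v : Int, 0 ≤ x → 0 ≤ v → x.toNat < G.length → v.toNat < G.length → x ≠ v →
      costOf c x v = some (bCost c x v) := by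
  intro x v hx0 hv0 hxn hvn hxv
  obtain ⟨hn, hcase⟩ := hpre
  rcases hcase with h1 | ⟨hcl, hrows⟩
  · exfalso; omega
  · have hxl : x.toNat < c.length := by omega
    have hrowget : (c)[x.toNat]? = some (c.getD x.toNat []) :=
      getElem?_eq_some_getD c x.toNat [] hxl
    have hrowmem : c.getD x.toNat [] ∈ c.take G.length := by
      have h2 : (c.take G.length)[x.toNat]? = some (c.getD x.toNat []) := by
        rw [List.getElem?_take_of_lt hxn]; exact hrowget
      exact List.mem_of_getElem? h2
    have hvl : v.toNat < (c.getD x.toNat []).length := by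
      have := hrows _ hrowmem
      omega
    unfold costOf bCost
    rw [PySem.List.pyGet?_of_nonneg _ hx0, hrowget, Option.bind_some,
      PySem.List.pyGet?_of_nonneg _ hv0,
      getElem?_eq_some_getD (c.getD x.toNat []) v.toNat 0 hvl]

-- ---------- the children table ----------

lemma mem_CH {T : List (Option Int)} {n : Nat} {u v : Int} :
    v ∈ CH T n u ↔ 0 ≤ v ∧ v < (n : Int) ∧ PySem.List.pyGet? T v = some (some u) := by
  simp [CH, List.mem_filter, PySem.List.mem_pyRange_one, and_assoc]

lemma bChild_getD (T : List (Option Int)) (n : Nat) (d : PySem.Dict Int Int)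
    (hm : dictMatch d T) (hT : T.length = n) (hT0 : T.getD 0 none = none)
    (hbound : ∀ (i : Nat) (w : Int), T[i]? = some (some w) → 0 ≤ w ∧ w.toNat < n) :
    ∀ u : Int, 0 ≤ u → (bChild d n).getD u.toNat [] = CH T n u := by
  intro u hu0
  have hlenfold : ∀ (S : List Int) (acc : List (List Int)),
      (S.foldl (fun ch v =>
        match d.get? v with
        | some p => ch.set p.toNat ((ch.getD p.toNat []) ++ [v])
        | none => ch) acc).length = acc.length := by
    intro S
    induction S with
    | nil => intro acc; rfl
    | cons v t ih =>
      intro acc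
      simp only [List.foldl_cons]
      cases hgv : d.get? v with
      | none => exact ih acc
      | some q => rw [ih]; simp
  by_cases hun : u.toNat < n
  · -- in-range slot: one fold pass appends each child to its parent's slot in order
    have hok : ∀ v ∈ PySem.List.pyRange 1 (n : Int) 1, ∀ q, d.get? v = some q →
        0 ≤ q ∧ q.toNat < n := by
      intro v hv q hq
      rw [PySem.List.mem_pyRange_one] at hv
      have hq2 : T.getD v.toNat none = some q := by
        have := hm v
        rw [if_pos (by omega)] at this
        rw [← this]
        exact hq
      have hget : T[v.toNat]? = some (some q) := by
        rw [getElem?_eq_some_getD T v.toNat none (by omega), hq2]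
      exact hbound v.toNat q hget
    have hcore : ∀ (S : List Int) (acc : List (List Int)), acc.length = n →
        (∀ v ∈ S, ∀ q, d.get? v = some q → 0 ≤ q ∧ q.toNat < n) →
        (S.foldl (fun ch v =>
          match d.get? v with
          | some p => ch.set p.toNat ((ch.getD p.toNat []) ++ [v])
          | none => ch) acc).getD u.toNat [] =
          acc.getD u.toNat [] ++ S.filter (fun v => d.get? v == some u) := by
      intro S
      induction S with
      | nil => intro acc _ _; simp
      | cons v t ih =>
        intro acc hacc hokS
        have hokt := fun w hw => hokS w (List.mem_cons_of_mem _ hw)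
        simp only [List.foldl_cons, List.filter_cons]
        cases hgv : d.get? v with
        | none =>
          rw [ih acc hacc hokt]
          rw [show ((none : Option Int) == some u) = false from rfl]
          rw [if_neg (by simp)]
        | some q =>
          obtain ⟨hq0, hqn⟩ := hokS v (List.mem_cons_self ..) q hgv
          by_cases hqu : q = u
          · subst hqu
            rw [ih _ (by simp [hacc]) hokt,
              getD_set_self_of_lt _ _ _ _ (by omega),
              if_pos (by simp)]
            simp
          · rw [ih _ (by simp [hacc]) hokt,
              getD_set_ne _ _ _ _ _ (by omega),
              if_neg (by simp [hqu])]
    unfold bChild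
    rw [hcore _ _ (by simp) hok]
    have hrepl : (List.replicate n ([] : List Int)).getD u.toNat [] = [] := by
      rw [List.getD_eq_getElem?_getD, List.getElem?_replicate]
      split <;> rfl
    rw [hrepl, List.nil_append]
    have hCH : CH T n u =
        (PySem.List.pyRange 1 (n : Int) 1).filter
          (fun v => PySem.List.pyGet? T v == some (some u)) := by
      unfold CH
      rw [PySem.List.pyRange_one_cons (by omega : (0 : Int) < n), List.filter_cons]
      have h0c : (PySem.List.pyGet? T 0 == some (some u)) = false := by
        rw [PySem.List.pyGet?_zero, getElem?_eq_some_getD T 0 none (by omega), hT0]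
        rfl
      rw [h0c, if_neg (by simp)]
      norm_num
    rw [hCH]
    refine List.filter_congr ?_
    intro v hv
    rw [PySem.List.mem_pyRange_one] at hv
    have hmv := hm v
    rw [if_pos (by omega : (0 : Int) ≤ v)] at hmv
    rw [hmv, PySem.List.pyGet?_of_nonneg _ (by omega : (0 : Int) ≤ v),
      getElem?_eq_some_getD T v.toNat none (by omega)]
    rfl
  · -- out-of-range slot: both sides are empty
    unfold bChild
    rw [List.getD_eq_getElem?_getD,
      List.getElem?_eq_none (by rw [hlenfold]; simp; omega), Option.getD_none]
    symm
    unfold CH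
    rw [List.filter_eq_nil_iff]
    intro v hv
    rw [PySem.List.mem_pyRange_one] at hv
    have hvn : v.toNat < T.length := by omega
    rw [PySem.List.pyGet?_of_nonneg _ (by omega : (0 : Int) ≤ v),
      getElem?_eq_some_getD T v.toNat none hvn]
    intro hcon
    have heq : T.getD v.toNat none = some u := by simpa using hcon
    have := hbound v.toNat u (by rw [getElem?_eq_some_getD T v.toNat none hvn, heq])
    omega

-- ---------- the DFS against the stack walk ----------

lemma flatMap_congr' {α β : Type} {l : List α} {f g : α → List β}
    (h : ∀ v ∈ l, f v = g v) : l.flatMap f = l.flatMap g :=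
  List.flatMap_congr h

lemma mu_lt_of_mem_CH {T : List (Option Int)} {n : Nat} {μ : Int → Nat}
    (hedge : ∀ (i : Nat) (w : Int), T[i]? = some (some w) → μ w < μ i)
    {u v : Int} (hv : v ∈ CH T n u) : μ u < μ v := by
  rw [mem_CH] at hv
  obtain ⟨h0, hlt, hget⟩ := hv
  rw [PySem.List.pyGet?_of_nonneg T h0] at hget
  have := hedge v.toNat u hget
  rwa [Int.toNat_of_nonneg h0] at this

lemma bDfs_stable (T : List (Option Int)) (n : Nat) (μ : Int → Nat)
    (hb : ∀ x, μ x ≤ n)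
    (hedge : ∀ (i : Nat) (w : Int), T[i]? = some (some w) → μ w < μ i)
    (ch : List (List Int)) (hd : ∀ u : Int, 0 ≤ u → ch.getD u.toNat [] = CH T n u) :
    ∀ (b b' : Nat) (u : Int), 0 ≤ u → 1 ≤ b → 1 ≤ b' →
      n + 1 ≤ b + μ u → n + 1 ≤ b' + μ u → bDfs ch b u = bDfs ch b' u := by
  intro b
  induction b with
  | zero => intro b' u _ h1; omega
  | succ β ih =>
    intro b' u hu0 h1 h1' h2 h2'
    cases b' with
    | zero => omega
    | succ β' =>
      simp only [bDfs]
      congr 1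
      rw [hd u hu0]
      apply flatMap_congr'
      intro v hv
      have hvCH : v ∈ CH T n u := List.mem_reverse.mp hv
      have hlt := mu_lt_of_mem_CH hedge hvCH
      have hv0 : 0 ≤ v := (mem_CH.mp hvCH).1
      have hbv := hb v
      apply ih <;> omega

lemma bDfs_unfold (T : List (Option Int)) (n : Nat) (μ : Int → Nat)
    (hb : ∀ x, μ x ≤ n)
    (hedge : ∀ (i : Nat) (w : Int), T[i]? = some (some w) → μ w < μ i)
    (ch : List (List Int)) (hd : ∀ u : Int, 0 ≤ u → ch.getD u.toNat [] = CH T n u)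
    (u : Int) (hu0 : 0 ≤ u) :
    bDfs ch (n + 1) u = u :: (CH T n u).reverse.flatMap (bDfs ch (n + 1)) := by
  conv_lhs => rw [bDfs]
  rw [hd u hu0]
  congr 1
  apply flatMap_congr'
  intro v hv
  have hvCH : v ∈ CH T n u := List.mem_reverse.mp hv
  have hlt := mu_lt_of_mem_CH hedge hvCH
  have hv0 : 0 ≤ v := (mem_CH.mp hvCH).1
  have hbv := hb v
  have hbu := hb u
  apply bDfs_stable T n μ hb hedge ch hd <;> omega

lemma bDfs_len (T : List (Option Int)) (n : Nat)
    (ch : List (List Int)) (hd : ∀ u : Int, 0 ≤ u → ch.getD u.toNat [] = CH T n u) :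
    ∀ (b : Nat) (u : Int), 0 ≤ u → (bDfs ch b u).length ≤ (n + 1) ^ b := by
  intro b
  induction b with
  | zero => intro u _; simp [bDfs]
  | succ β ih =>
    intro u hu0
    simp only [bDfs, List.length_cons, List.length_flatMap]
    rw [hd u hu0]
    have h1 : ∀ x ∈ ((CH T n u).reverse.map (fun v => (bDfs ch β v).length)),
        x ≤ (n + 1) ^ β := by
      intro x hx
      obtain ⟨v, hv, rfl⟩ := List.mem_map.mp hx
      exact ih v (mem_CH.mp (List.mem_reverse.mp hv)).1
    have h2 := List.sum_le_card_nsmul _ _ h1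
    have h3 : (CH T n u).length ≤ n := by
      have := List.length_filter_le
        (fun v => PySem.List.pyGet? T v == some (some u)) (PySem.List.pyRange 0 n 1)
      have hr : (PySem.List.pyRange 0 n 1).length = n := by
        rw [PySem.List.length_pyRange_one]; omega
      unfold CH
      omega
    have h4 : ((CH T n u).reverse.map (fun v => (bDfs ch β v).length)).length ≤ n := by
      simpa using h3
    have h5 : (1 : Nat) ≤ (n + 1) ^ β := Nat.one_le_pow _ _ (by omega)
    have h6 : ((CH T n u).reverse.map (fun v => (bDfs ch β v).length)).sum ≤ n * (n + 1) ^ β := by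
      calc _ ≤ _ := h2
        _ ≤ n * (n + 1) ^ β := by
          rw [smul_eq_mul]
          exact Nat.mul_le_mul_right _ h4
    rw [pow_succ]
    nlinarith

lemma chFold_eq (T : List (Option Int)) (n : Nat) (u : Int) (stack : List Int) :
    chFold T n u stack = stack ++ CH T n u := by
  unfold chFold CH
  exact PySem.List.foldl_append_if_eq_filter _ _ _

lemma walkA_concat (T : List (Option Int)) (n f : Nat) (ys : List Int) (u : Int) :
    walkA T n (f + 1) (ys ++ [u]) = u :: walkA T n f (chFold T n u ys) := by
  cases ys with
  | nil => simp [walkA]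
  | cons y t =>
    have hg : (y :: (t ++ [u])).getLast (by simp) = u := by
      simp
    have hd : (y :: (t ++ [u])).dropLast = y :: t := by
      rw [← List.cons_append, List.dropLast_concat]
    simp only [List.cons_append, walkA, hg, hd]

lemma walk_eq (T : List (Option Int)) (n : Nat) (μ : Int → Nat)
    (hb : ∀ x, μ x ≤ n)
    (hedge : ∀ (i : Nat) (w : Int), T[i]? = some (some w) → μ w < μ i)
    (ch : List (List Int)) (hd : ∀ u : Int, 0 ≤ u → ch.getD u.toNat [] = CH T n u) :
    ∀ (f : Nat) (stack : List Int), (∀ x ∈ stack, 0 ≤ x) →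
      (stack.reverse.map (fun u => (bDfs ch (n + 1) u).length)).sum ≤ f →
      walkA T n f stack = stack.reverse.flatMap (bDfs ch (n + 1)) := by
  intro f
  induction f with
  | zero =>
    intro stack _ hsum
    cases stack with
    | nil => simp [walkA]
    | cons s rest =>
      exfalso
      have h1 : 1 ≤ (bDfs ch (n + 1) s).length := by simp [bDfs]
      have h2 : ((s :: rest).reverse.map (fun v => (bDfs ch (n + 1) v).length)).sum =
          (rest.reverse.map (fun v => (bDfs ch (n + 1) v).length)).sum +
            (bDfs ch (n + 1) s).length := by
        simp
      omega
  | succ f ih =>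
    intro stack hnn hsum
    rcases List.eq_nil_or_concat stack with rfl | ⟨ys, u, rfl⟩
    · simp [walkA]
    · rw [List.concat_eq_append] at hsum hnn ⊢
      have hu0 : 0 ≤ u := hnn u (by simp)
      rw [walkA_concat, chFold_eq]
      have hunf := bDfs_unfold T n μ hb hedge ch hd u hu0
      have hlenu : (bDfs ch (n + 1) u).length =
          1 + ((CH T n u).reverse.map (fun v => (bDfs ch (n + 1) v).length)).sum := by
        rw [hunf]; simp [List.length_flatMap]; omega
      have hsum' : ((ys ++ CH T n u).reverse.map (fun v => (bDfs ch (n + 1) v).length)).sum ≤ f := by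
        simp only [List.reverse_append, List.reverse_singleton, List.singleton_append,
          List.map_cons, List.sum_cons, List.map_append, List.sum_append] at hsum ⊢
        omega
      have hnn' : ∀ x ∈ ys ++ CH T n u, 0 ≤ x := by
        intro x hx
        rcases List.mem_append.mp hx with h | h
        · exact hnn x (List.mem_append.mpr (Or.inl h))
        · exact (mem_CH.mp h).1
      rw [ih _ hnn' hsum']
      rw [List.reverse_append, List.reverse_append]
      simp only [List.flatMap_append, List.reverse_cons, List.reverse_nil,
        List.nil_append, List.flatMap_cons, List.flatMap_nil, List.append_nil]
      rw [hunf]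
      simp

-- ===== VERDICT (by name: the statement is the Claim_ definition above) =====
theorem Approx_TSP_Tour_spec : Claim_equal_Approx_TSP_Tour := by
  intro G c _ hpre
  unfold Spec_Approx_TSP_Tour
  have hfull := pre_full G c hpre
  have hn : 1 ≤ G.length := hpre.1
  show walkA (MST_Prim G c 0) G.length ((G.length + 1) ^ (G.length + 1)) [0] ++ [0] =
    bDfs (bChild (bLoop c (G.length + 1) 0
        ((PySem.List.pyRange 1 G.length 1).map (fun v => (v, (none : Option Int))))
        PySem.Dict.empty) G.length) (G.length + 1) 0 ++ [0]
  obtain ⟨hlen, hbound, μ, hb, hedge⟩ := mst_good G c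
  have hdm := prim_match G c hn hfull
  have hd := bChild_getD (MST_Prim G c 0) G.length _ hdm hlen (mst_p0 G c hn) hbound
  have hw := walk_eq (MST_Prim G c 0) G.length μ hb hedge _ hd
    ((G.length + 1) ^ (G.length + 1)) [0] (by intro x hx; simp at hx; omega)
    (by simpa using bDfs_len (MST_Prim G c 0) G.length _ hd (G.length + 1) 0 (by omega))
  rw [hw]
  simp
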